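-- pv_equiv track=rewrite | github.com/antonkurenkov/geek_algos | 04/task_01.py | count
-- ===== SOURCE A (Python) =====
-- def count(n):
-- 	"""
-- 	Наиболее предпочтительный по скорости вариант
-- 	"""
-- 	r = range(1, 10)
-- 	counter = {i:0 for i in r}
-- 	for num in range(2, n):
-- 		for i in r:
-- 			if not num % i:
-- 				counter[i] += 1
-- 	return counter
-- ===== SOURCE B (Python) =====
-- def count(n):
--     m = max(n - 1, 1)
--     return {i: m // i - (i == 1) for i in range(1, 10)}
-- ===== Notes on version B (the rewrite author's own statement) =====
-- stated objective: faster
-- what changed: B replaces A's loop over all numbers in range(2,n) with the closed form floor((n-1)/i) (minus 1 for i=1) for each divisor i in 1..9.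
import Mathlib
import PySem

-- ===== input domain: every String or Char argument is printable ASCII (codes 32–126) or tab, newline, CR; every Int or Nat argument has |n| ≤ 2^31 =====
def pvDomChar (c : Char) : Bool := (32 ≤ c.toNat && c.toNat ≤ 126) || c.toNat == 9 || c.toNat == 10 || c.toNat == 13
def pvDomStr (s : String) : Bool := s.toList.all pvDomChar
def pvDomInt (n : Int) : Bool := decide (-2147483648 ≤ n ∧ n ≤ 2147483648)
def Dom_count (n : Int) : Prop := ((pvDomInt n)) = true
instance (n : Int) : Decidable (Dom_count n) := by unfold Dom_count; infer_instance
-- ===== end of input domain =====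

-- B replaces A's O(n) divisor-counting loop by the closed form floor((n-1)/i) (minus 1 for i=1), per i in 1..9: faster (asymptotic).

-- ===== PORT A =====
-- A: counter = {i:0 for i in 1..9}; for num in range(2,n): for i in 1..9: if not num % i: counter[i] += 1
def count (n : Int) : List (Int × Int) :=
  let r := PySem.List.pyRange 1 10 1
  let counter : PySem.Dict Int Int := r.foldl (fun d i => d.insert i 0) PySem.Dict.empty
  let counter := (PySem.List.pyRange 2 n 1).foldl
    (fun d num => r.foldl (fun d i => if PySem.Int.mod num i = 0 then d.modify i 0 (· + 1) else d) d)
    counter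
  counter.items

-- ===== PORT B =====
def count_alt (n : Int) : List (Int × Int) :=
  let m := max (n - 1) 1
  (PySem.List.pyRange 1 10 1).map (fun i => (i, PySem.Int.floordiv m i - (if i = 1 then 1 else 0)))

-- ===== PRECONDITION & SPEC =====
def Spec_count (n : Int) (out : List (Int × Int)) : Prop := out = count_alt n
instance (n : Int) (out : List (Int × Int)) : Decidable (Spec_count n out) := by unfold Spec_count; infer_instance

-- ===== CLAIM (what is proved, stated in full; the proofs are below) =====
def Claim_equal_count : Prop := ∀ (n : Int), Dom_count n → Spec_count n (count n)

-- ===== LEMMAS AND PROOFS =====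

-- the inner loop of A over one num
def innerStep (d : PySem.Dict Int Int) (num : Int) : PySem.Dict Int Int :=
  (PySem.List.pyRange 1 10 1).foldl
    (fun d i => if PySem.Int.mod num i = 0 then d.modify i 0 (· + 1) else d) d

lemma dstep1 (c : Prop) [Decidable c] (v1 v2 v3 v4 v5 v6 v7 v8 v9 : Int) :
    (if c then (PySem.Dict.mk [((1:Int),v1),(2,v2),(3,v3),(4,v4),(5,v5),(6,v6),(7,v7),(8,v8),(9,v9)]).modify 1 0 (· + 1)
     else PySem.Dict.mk [((1:Int),v1),(2,v2),(3,v3),(4,v4),(5,v5),(6,v6),(7,v7),(8,v8),(9,v9)]) =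
      PySem.Dict.mk [(1, v1 + (if c then 1 else 0)),(2,v2),(3,v3),(4,v4),(5,v5),(6,v6),(7,v7),(8,v8),(9,v9)] := by
  split_ifs <;> first | rfl | simp

lemma dstep2 (c : Prop) [Decidable c] (v1 v2 v3 v4 v5 v6 v7 v8 v9 : Int) :
    (if c then (PySem.Dict.mk [((1:Int),v1),(2,v2),(3,v3),(4,v4),(5,v5),(6,v6),(7,v7),(8,v8),(9,v9)]).modify 2 0 (· + 1)
     else PySem.Dict.mk [((1:Int),v1),(2,v2),(3,v3),(4,v4),(5,v5),(6,v6),(7,v7),(8,v8),(9,v9)]) =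
      PySem.Dict.mk [(1,v1),(2, v2 + (if c then 1 else 0)),(3,v3),(4,v4),(5,v5),(6,v6),(7,v7),(8,v8),(9,v9)] := by
  split_ifs <;> first | rfl | simp

lemma dstep3 (c : Prop) [Decidable c] (v1 v2 v3 v4 v5 v6 v7 v8 v9 : Int) :
    (if c then (PySem.Dict.mk [((1:Int),v1),(2,v2),(3,v3),(4,v4),(5,v5),(6,v6),(7,v7),(8,v8),(9,v9)]).modify 3 0 (· + 1)
     else PySem.Dict.mk [((1:Int),v1),(2,v2),(3,v3),(4,v4),(5,v5),(6,v6),(7,v7),(8,v8),(9,v9)]) =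
      PySem.Dict.mk [(1,v1),(2,v2),(3, v3 + (if c then 1 else 0)),(4,v4),(5,v5),(6,v6),(7,v7),(8,v8),(9,v9)] := by
  split_ifs <;> first | rfl | simp

lemma dstep4 (c : Prop) [Decidable c] (v1 v2 v3 v4 v5 v6 v7 v8 v9 : Int) :
    (if c then (PySem.Dict.mk [((1:Int),v1),(2,v2),(3,v3),(4,v4),(5,v5),(6,v6),(7,v7),(8,v8),(9,v9)]).modify 4 0 (· + 1)
     else PySem.Dict.mk [((1:Int),v1),(2,v2),(3,v3),(4,v4),(5,v5),(6,v6),(7,v7),(8,v8),(9,v9)]) =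
      PySem.Dict.mk [(1,v1),(2,v2),(3,v3),(4, v4 + (if c then 1 else 0)),(5,v5),(6,v6),(7,v7),(8,v8),(9,v9)] := by
  split_ifs <;> first | rfl | simp

lemma dstep5 (c : Prop) [Decidable c] (v1 v2 v3 v4 v5 v6 v7 v8 v9 : Int) :
    (if c then (PySem.Dict.mk [((1:Int),v1),(2,v2),(3,v3),(4,v4),(5,v5),(6,v6),(7,v7),(8,v8),(9,v9)]).modify 5 0 (· + 1)
     else PySem.Dict.mk [((1:Int),v1),(2,v2),(3,v3),(4,v4),(5,v5),(6,v6),(7,v7),(8,v8),(9,v9)]) =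
      PySem.Dict.mk [(1,v1),(2,v2),(3,v3),(4,v4),(5, v5 + (if c then 1 else 0)),(6,v6),(7,v7),(8,v8),(9,v9)] := by
  split_ifs <;> first | rfl | simp

lemma dstep6 (c : Prop) [Decidable c] (v1 v2 v3 v4 v5 v6 v7 v8 v9 : Int) :
    (if c then (PySem.Dict.mk [((1:Int),v1),(2,v2),(3,v3),(4,v4),(5,v5),(6,v6),(7,v7),(8,v8),(9,v9)]).modify 6 0 (· + 1)
     else PySem.Dict.mk [((1:Int),v1),(2,v2),(3,v3),(4,v4),(5,v5),(6,v6),(7,v7),(8,v8),(9,v9)]) =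
      PySem.Dict.mk [(1,v1),(2,v2),(3,v3),(4,v4),(5,v5),(6, v6 + (if c then 1 else 0)),(7,v7),(8,v8),(9,v9)] := by
  split_ifs <;> first | rfl | simp

lemma dstep7 (c : Prop) [Decidable c] (v1 v2 v3 v4 v5 v6 v7 v8 v9 : Int) :
    (if c then (PySem.Dict.mk [((1:Int),v1),(2,v2),(3,v3),(4,v4),(5,v5),(6,v6),(7,v7),(8,v8),(9,v9)]).modify 7 0 (· + 1)
     else PySem.Dict.mk [((1:Int),v1),(2,v2),(3,v3),(4,v4),(5,v5),(6,v6),(7,v7),(8,v8),(9,v9)]) =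
      PySem.Dict.mk [(1,v1),(2,v2),(3,v3),(4,v4),(5,v5),(6,v6),(7, v7 + (if c then 1 else 0)),(8,v8),(9,v9)] := by
  split_ifs <;> first | rfl | simp

lemma dstep8 (c : Prop) [Decidable c] (v1 v2 v3 v4 v5 v6 v7 v8 v9 : Int) :
    (if c then (PySem.Dict.mk [((1:Int),v1),(2,v2),(3,v3),(4,v4),(5,v5),(6,v6),(7,v7),(8,v8),(9,v9)]).modify 8 0 (· + 1)
     else PySem.Dict.mk [((1:Int),v1),(2,v2),(3,v3),(4,v4),(5,v5),(6,v6),(7,v7),(8,v8),(9,v9)]) =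
      PySem.Dict.mk [(1,v1),(2,v2),(3,v3),(4,v4),(5,v5),(6,v6),(7,v7),(8, v8 + (if c then 1 else 0)),(9,v9)] := by
  split_ifs <;> first | rfl | simp

lemma dstep9 (c : Prop) [Decidable c] (v1 v2 v3 v4 v5 v6 v7 v8 v9 : Int) :
    (if c then (PySem.Dict.mk [((1:Int),v1),(2,v2),(3,v3),(4,v4),(5,v5),(6,v6),(7,v7),(8,v8),(9,v9)]).modify 9 0 (· + 1)
     else PySem.Dict.mk [((1:Int),v1),(2,v2),(3,v3),(4,v4),(5,v5),(6,v6),(7,v7),(8,v8),(9,v9)]) =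
      PySem.Dict.mk [(1,v1),(2,v2),(3,v3),(4,v4),(5,v5),(6,v6),(7,v7),(8,v8),(9, v9 + (if c then 1 else 0))] := by
  split_ifs <;> first | rfl | simp

-- the inner loop on the 9-entry dict: each slot gains the divisibility indicator
lemma innerStep_mk (num a1 a2 a3 a4 a5 a6 a7 a8 a9 : Int) :
    innerStep (PySem.Dict.mk [(1,a1),(2,a2),(3,a3),(4,a4),(5,a5),(6,a6),(7,a7),(8,a8),(9,a9)]) num =
      PySem.Dict.mk [
        (1, a1 + (if PySem.Int.mod num 1 = 0 then 1 else 0)),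
        (2, a2 + (if PySem.Int.mod num 2 = 0 then 1 else 0)),
        (3, a3 + (if PySem.Int.mod num 3 = 0 then 1 else 0)),
        (4, a4 + (if PySem.Int.mod num 4 = 0 then 1 else 0)),
        (5, a5 + (if PySem.Int.mod num 5 = 0 then 1 else 0)),
        (6, a6 + (if PySem.Int.mod num 6 = 0 then 1 else 0)),
        (7, a7 + (if PySem.Int.mod num 7 = 0 then 1 else 0)),
        (8, a8 + (if PySem.Int.mod num 8 = 0 then 1 else 0)),
        (9, a9 + (if PySem.Int.mod num 9 = 0 then 1 else 0))] := by
  unfold innerStep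
  rw [show PySem.List.pyRange 1 10 1 = [1,2,3,4,5,6,7,8,9] from by decide]
  simp only [List.foldl_cons, List.foldl_nil]
  rw [dstep1, dstep2, dstep3, dstep4, dstep5, dstep6, dstep7, dstep8, dstep9]

-- the outer loop: each slot ends as start + count of multiples seen
lemma outer_fold (nums : List Int) :
    ∀ a1 a2 a3 a4 a5 a6 a7 a8 a9 : Int,
      nums.foldl innerStep (PySem.Dict.mk [(1,a1),(2,a2),(3,a3),(4,a4),(5,a5),(6,a6),(7,a7),(8,a8),(9,a9)]) =
        PySem.Dict.mk [
          (1, a1 + (nums.countP (fun num => PySem.Int.mod num 1 = 0) : Int)),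
          (2, a2 + (nums.countP (fun num => PySem.Int.mod num 2 = 0) : Int)),
          (3, a3 + (nums.countP (fun num => PySem.Int.mod num 3 = 0) : Int)),
          (4, a4 + (nums.countP (fun num => PySem.Int.mod num 4 = 0) : Int)),
          (5, a5 + (nums.countP (fun num => PySem.Int.mod num 5 = 0) : Int)),
          (6, a6 + (nums.countP (fun num => PySem.Int.mod num 6 = 0) : Int)),
          (7, a7 + (nums.countP (fun num => PySem.Int.mod num 7 = 0) : Int)),
          (8, a8 + (nums.countP (fun num => PySem.Int.mod num 8 = 0) : Int)),
          (9, a9 + (nums.countP (fun num => PySem.Int.mod num 9 = 0) : Int))] := by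
  induction nums with
  | nil => intro a1 a2 a3 a4 a5 a6 a7 a8 a9; simp
  | cons num nums ih =>
      intro a1 a2 a3 a4 a5 a6 a7 a8 a9
      rw [List.foldl_cons, innerStep_mk, ih]
      simp only [PySem.Dict.mk.injEq, List.cons.injEq, Prod.mk.injEq, List.countP_cons,
        decide_eq_true_eq]
      and_intros <;> try rfl
      all_goals first | trivial | (split_ifs <;> push_cast <;> ring)

-- ediv gains 1 exactly at multiples
lemma ediv_succ (i n : Int) (hi : 0 < i) :
    (n + 1) / i = n / i + (if (n + 1) % i = 0 then 1 else 0) := by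
  by_cases h : i ∣ (n + 1)
  · obtain ⟨q, hq⟩ := h
    have h1 : (n + 1) / i = q := by
      rw [hq]; exact Int.mul_ediv_cancel_left q (by omega)
    have h2 : n / i = q - 1 := by
      have : n = (i - 1) + (q - 1) * i := by linear_combination hq
      rw [this, Int.add_mul_ediv_right _ _ (by omega : i ≠ 0),
        Int.ediv_eq_zero_of_lt (by omega) (by omega)]
      ring
    have h3 : (n + 1) % i = 0 := by rw [hq]; exact Int.mul_emod_right i q
    simp [h1, h2, h3]
  · have h3 : (n + 1) % i ≠ 0 := fun hc => h (Int.dvd_of_emod_eq_zero hc)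
    have hr0 : 0 ≤ (n + 1) % i := Int.emod_nonneg _ (by omega)
    have hr1 : (n + 1) % i < i := Int.emod_lt_of_pos _ hi
    have hd : n + 1 = i * ((n + 1) / i) + (n + 1) % i := (Int.ediv_add_emod _ _).symm
    have h2 : n / i = (n + 1) / i := by
      have hrepr : n = ((n + 1) % i - 1) + ((n + 1) / i) * i := by linear_combination hd
      conv_lhs => rw [hrepr]
      rw [Int.add_mul_ediv_right _ _ (by omega : i ≠ 0),
        Int.ediv_eq_zero_of_lt (by omega) (by omega)]
      ring
    simp [h2, h3]

-- the count of multiples of i in range(2, n) as a closed form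
lemma countP_mult (i : Int) (hi : 0 < i) (n : Int) :
    ((PySem.List.pyRange 2 n 1).countP (fun num => PySem.Int.mod num i = 0) : Int) =
      PySem.Int.floordiv (max (n - 1) 1) i - (if i = 1 then 1 else 0) := by
  by_cases hn : n ≤ 2
  · rw [PySem.List.pyRange_one_eq_nil hn]
    have hm : max (n - 1) 1 = 1 := by omega
    rw [hm, PySem.Int.floordiv_eq_ediv_of_pos hi]
    by_cases h1 : i = 1
    · simp [h1]
    · rw [Int.ediv_eq_zero_of_lt (by omega) (by omega)]; simp [h1]
  · push_neg at hn
    have h2n : 2 ≤ n := by omega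
    clear hn
    induction n, h2n using Int.le_induction with
    | base =>
        rw [PySem.List.pyRange_one_eq_nil (by omega)]
        rw [show max (2 - 1 : Int) 1 = 1 by omega, PySem.Int.floordiv_eq_ediv_of_pos hi]
        by_cases h1 : i = 1
        · simp [h1]
        · rw [Int.ediv_eq_zero_of_lt (by omega) (by omega)]; simp [h1]
    | succ m hm ih =>
        rw [PySem.List.pyRange_one_succ_right (by omega), List.countP_append]
        have ih' := ih
        rw [show max (m + 1 - 1) 1 = (m - 1) + 1 by omega,
          PySem.Int.floordiv_eq_ediv_of_pos hi,
          ediv_succ i (m - 1) hi]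
        rw [show max (m - 1) 1 = m - 1 by omega, PySem.Int.floordiv_eq_ediv_of_pos hi] at ih'
        push_cast
        rw [ih']
        have : PySem.Int.mod m i = m % i := PySem.Int.mod_eq_emod_of_pos hi
        simp only [List.countP_cons, List.countP_nil, show m - 1 + 1 = m by ring, this,
          decide_eq_true_eq]
        split_ifs <;> push_cast <;> ring

-- ===== VERDICT (by name: the statement is the Claim_ definition above) =====
set_option maxHeartbeats 1000000 in
theorem count_spec : Claim_equal_count := by
  intro n _
  unfold Spec_count count count_alt
  dsimp only
  have hinit : (PySem.List.pyRange 1 10 1).foldl (fun d i => d.insert i (0:Int)) PySem.Dict.empty =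
      PySem.Dict.mk [(1,0),(2,0),(3,0),(4,0),(5,0),(6,0),(7,0),(8,0),(9,0)] := by decide
  rw [hinit]
  rw [show (fun (d : PySem.Dict Int Int) num =>
      (PySem.List.pyRange 1 10 1).foldl
        (fun d i => if PySem.Int.mod num i = 0 then d.modify i 0 (· + 1) else d) d) = innerStep
    from rfl]
  rw [outer_fold]
  rw [show PySem.List.pyRange 1 10 1 = [1,2,3,4,5,6,7,8,9] from by decide]
  simp only [List.map_cons, List.map_nil, List.cons.injEq, Prod.mk.injEq,
    zero_add]
  and_intros <;> try rfl
  all_goals first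
    | exact trivial
    | (rw [countP_mult _ (by norm_num) n]; try norm_num)
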